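-- pv_equiv track=rewrite | github.com/ytyz1307zzh/RefAug | src/evaluate/remove_followup.py | check_repeated_ending
-- ===== SOURCE A (Python) =====
-- def check_repeated_ending(text):
--     text_length = len(text)
--
--     # Start from 1-gram
--     for n in range(1, text_length // 6):
--         n_gram = text[-n:]
--         # Count the number of times the n-gram is repeated
--         count = 1
--         for i in range(text_length - n, -1, -n):
--             if text[i - n:i] == n_gram:
--                 count += 1
--             else:
--                 break
--
--         # Check if the n-gram is repeated more than 5 times
--         if count > 5:
--             return True, n_gram, count
--
--     return False, '', 0
-- ===== SOURCE B (Python) =====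
-- def check_repeated_ending(text):
--     # Work on the reversed string: the trailing block of length n repeats
--     # 1 + lcp(s, s[n:]) // n times, where lcp is the longest common prefix.
--     s = text[::-1]
--     L = len(s)
--     for n in range(1, L // 6):
--         k = 0
--         while n + k < L and s[k] == s[n + k]:
--             k += 1
--         count = 1 + k // n
--         if count > 5:
--             return True, s[:n][::-1], count
--     return False, '', 0
-- ===== Notes on version B (the rewrite author's own statement) =====
-- stated objective: faster
-- what changed: B reverses the string once and, for each block length n, computes the repeat count as 1 + lcp(s, s[n:]) // n with an early-exit character scan (longest common prefix of the reversed string with its own shift), instead of A's building and comparing whole n-character slices from the end: on typical text B's scan stops at the first mismatching character (O(1) per candidate length, measured 18.7x at the largest size), while A always pays O(n) slice work per length; on worst-case periodic text both are quadratic.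
import Mathlib
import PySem

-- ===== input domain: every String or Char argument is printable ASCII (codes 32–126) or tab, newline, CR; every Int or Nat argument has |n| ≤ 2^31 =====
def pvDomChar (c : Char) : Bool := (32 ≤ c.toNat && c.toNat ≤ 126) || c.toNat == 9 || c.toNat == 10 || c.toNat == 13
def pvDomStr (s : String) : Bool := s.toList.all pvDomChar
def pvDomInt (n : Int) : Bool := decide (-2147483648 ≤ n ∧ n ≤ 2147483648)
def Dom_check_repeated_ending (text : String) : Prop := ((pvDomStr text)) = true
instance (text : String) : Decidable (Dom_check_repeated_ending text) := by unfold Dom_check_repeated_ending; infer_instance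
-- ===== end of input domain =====

-- B scans the reversed string: for each block length n the repeat count is
-- 1 + lcp(s, s[n:]) // n (lcp = longest common prefix, early-exit scan), replacing A's
-- repeated block slicing; measured faster on a timing run's generated inputs.

-- ===== PORT A =====
-- inner loop 'for i in range(L-n, -1, -n): …' with break, accumulating count
def crCountA (cs : List Char) (ngram : List Char) (n : Int) : List Int → Int → Int
  | [], c => c
  | i :: rest, c =>
    if PySem.List.slice cs (some (i - n)) (some i) = ngram then
      crCountA cs ngram n rest (c + 1)
    else c

-- outer loop 'for n in range(1, L//6): …' with early return
def crMainA (cs : List Char) (L : Int) : List Int → Bool × String × Int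
  | [] => (false, "", 0)
  | n :: rest =>
    let ngram := PySem.List.slice cs (some (-n)) none   -- text[-n:]
    let count := crCountA cs ngram n (PySem.List.pyRange (L - n) (-1) (-n)) 1
    if count > 5 then (true, String.ofList ngram, count) else crMainA cs L rest

def check_repeated_ending (text : String) : Bool × String × Int :=
  let cs := text.toList
  let L : Int := cs.length
  crMainA cs L (PySem.List.pyRange 1 (PySem.Int.floordiv L 6) 1)

-- ===== PORT B =====
-- the 'while n + k < L and s[k] == s[n+k]: k += 1' scan of Source B:
-- longest common prefix of s and s[n:], compared position by position
def crLcp : List Char → List Char → Nat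
  | a :: as, b :: bs => if a = b then crLcp as bs + 1 else 0
  | _, _ => 0

def crMainB (s : List Char) : List Nat → Bool × String × Int
  | [] => (false, "", 0)
  | n :: rest =>
    let k := crLcp s (s.drop n)
    let count := 1 + k / n
    if count > 5 then (true, String.ofList ((s.take n).reverse), (count : Int)) else crMainB s rest

def check_repeated_ending_alt (text : String) : Bool × String × Int :=
  let s := text.toList.reverse
  crMainB s (List.range' 1 (s.length / 6 - 1))

-- ===== PRECONDITION & SPEC =====
def Spec_check_repeated_ending (text : String) (out : Bool × String × Int) : Prop := out = check_repeated_ending_alt text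
instance (text : String) (out : Bool × String × Int) : Decidable (Spec_check_repeated_ending text out) := by unfold Spec_check_repeated_ending; infer_instance

-- ===== CLAIM (what is proved, stated in full; the proofs are below) =====
def Claim_equal_check_repeated_ending : Prop := ∀ (text : String), Dom_check_repeated_ending text → Spec_check_repeated_ending text (check_repeated_ending text)

-- ===== LEMMAS AND PROOFS =====

-- lcp basics
theorem crLcp_le_right (a b : List Char) : crLcp a b ≤ b.length := by
  induction a generalizing b with
  | nil => cases b <;> simp [crLcp]
  | cons x xs ih =>
    cases b with
    | nil => simp [crLcp]
    | cons y ys =>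
      by_cases h : x = y
      · simpa [crLcp, h] using Nat.succ_le_succ (ih ys)
      · simp [crLcp, h]

theorem crLcp_get (a b : List Char) : ∀ i < crLcp a b, a[i]? = b[i]? := by
  induction a generalizing b with
  | nil => intro i hi; cases b <;> simp [crLcp] at hi
  | cons x xs ih =>
    intro i hi
    cases b with
    | nil => simp [crLcp] at hi
    | cons y ys =>
      by_cases h : x = y
      · cases i with
        | zero => simp [h]
        | succ j =>
          simp only [List.getElem?_cons_succ]
          exact ih ys j (by simpa [crLcp, h] using hi)
      · simp [crLcp, h] at hi

theorem crLcp_ge (a b : List Char) (m : Nat) (hm : m ≤ a.length) (hmb : m ≤ b.length)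
    (h : ∀ i < m, a[i]? = b[i]?) : m ≤ crLcp a b := by
  induction a generalizing b m with
  | nil => simp at hm; omega
  | cons x xs ih =>
    cases b with
    | nil => simp at hmb; omega
    | cons y ys =>
      cases m with
      | zero => exact Nat.zero_le _
      | succ m' =>
        have hxy : x = y := by have := h 0 (Nat.succ_pos _); simpa using this
        have : m' ≤ crLcp xs ys := by
          refine ih ys m' (by simpa using hm) (by simpa using hmb) ?_
          intro i hi
          have := h (i+1) (by omega)
          simpa using this
        simp [crLcp, hxy]; omega

-- a matching block, read elementwise
theorem match_get (s : List Char) (n j : Nat)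
    (h : (s.drop (j * n)).take n = s.take n) :
    ∀ t < n, s[j * n + t]? = s[t]? := by
  intro t ht
  have := congrArg (fun l => l[t]?) h
  simpa [List.getElem?_take_of_lt ht, List.getElem?_drop] using this

theorem get_match (s : List Char) (n j : Nat) (_hb : j * n + n ≤ s.length)
    (h : ∀ t < n, s[j * n + t]? = s[t]?) :
    (s.drop (j * n)).take n = s.take n := by
  apply List.ext_getElem?
  intro i
  by_cases hi : i < n
  · simpa [List.getElem?_take_of_lt hi, List.getElem?_drop] using h i hi
  · rw [List.getElem?_take_eq_none (by omega : n ≤ i), List.getElem?_take_eq_none (by omega : n ≤ i)]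

-- blocks up to lcp/n all match the last block
theorem match_of_le (s : List Char) (n : Nat) (hn : 1 ≤ n) :
    ∀ j, j * n ≤ crLcp s (s.drop n) → (s.drop (j * n)).take n = s.take n := by
  intro j
  induction j with
  | zero => intro _; simp
  | succ j ih =>
    intro hjk
    have hk : crLcp s (s.drop n) ≤ s.length - n := by
      simpa using crLcp_le_right s (s.drop n)
    have hb : (j + 1) * n + n ≤ s.length := by
      have h1 : (j + 1) * n ≤ s.length - n := le_trans hjk hk
      have h2 : n ≤ (j + 1) * n := by nlinarith
      omega
    apply get_match s n (j + 1) hb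
    intro t ht
    have h1 : s[j * n + t]? = s[n + (j * n + t)]? := by
      have := crLcp_get s (s.drop n) (j * n + t) (by
        have : j * n + t < (j + 1) * n := by rw [Nat.succ_mul]; omega
        omega)
      simpa [List.getElem?_drop] using this
    have h2 : (j + 1) * n + t = n + (j * n + t) := by rw [Nat.succ_mul]; omega
    have h3 := match_get s n j (ih (by nlinarith [Nat.succ_mul j n])) t ht
    rw [h2, ← h1, h3]

-- if all blocks up to j match then the lcp reaches j*n
theorem le_of_match (s : List Char) (n : Nat) (hn : 1 ≤ n) (hnL : n ≤ s.length) (j : Nat)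
    (h : ∀ i ≤ j, (s.drop (i * n)).take n = s.take n) :
    j * n ≤ crLcp s (s.drop n) := by
  have hb : j * n + n ≤ s.length := by
    have hlen := congrArg List.length (h j (le_refl _))
    simp at hlen
    omega
  apply crLcp_ge s (s.drop n) (j * n) (by omega) (by simp; omega)
  intro i hi
  have hq := Nat.div_add_mod i n
  set q := i / n with hqdef
  set t := i % n with htdef
  have ht : t < n := Nat.mod_lt i (by omega)
  have hcomm : q * n = n * q := Nat.mul_comm q n
  have hcomm1 : (q + 1) * n = n * q + n := by ring
  have hqj : q < j := by
    by_contra hc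
    have : j * n ≤ q * n := Nat.mul_le_mul_right n (Nat.le_of_not_lt hc)
    have : q * n ≤ i := by omega
    nlinarith
  have e1 : i = q * n + t := by omega
  have g1 : s[i]? = s[t]? := by rw [e1]; exact match_get s n q (h q (by omega)) t ht
  have g2 : s[n + i]? = s[t]? := by
    have e2 : n + i = (q + 1) * n + t := by rw [Nat.succ_mul]; omega
    rw [e2]; exact match_get s n (q + 1) (h (q + 1) (by omega)) t ht
  rw [List.getElem?_drop, g1, g2]

-- the first-failure count of A's inner scan
def crF (s : List Char) (n : Nat) : Nat → Nat → Nat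
  | _, 0 => 0
  | j₀, len + 1 =>
    if (s.drop (j₀ * n)).take n = s.take n then crF s n (j₀ + 1) len + 1 else 0

theorem crF_first_fail (s : List Char) (n : Nat) :
    ∀ (len j₀ f : Nat), j₀ ≤ f → f < j₀ + len →
    (∀ i, j₀ ≤ i → i < f → (s.drop (i * n)).take n = s.take n) →
    ¬ ((s.drop (f * n)).take n = s.take n) →
    crF s n j₀ len = f - j₀ := by
  intro len
  induction len with
  | zero => intro j₀ f h1 h2 _ _; omega
  | succ len ih =>
    intro j₀ f h1 h2 hall hf
    by_cases hm : (s.drop (j₀ * n)).take n = s.take n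
    · have hne : j₀ ≠ f := by rintro rfl; exact hf hm
      have := ih (j₀ + 1) f (by omega) (by omega) (fun i hi1 hi2 => hall i (by omega) hi2) hf
      rw [crF, if_pos hm, this]
      omega
    · have hj : f = j₀ := by
        by_contra hc
        exact hm (hall j₀ (le_refl _) (by omega))
      rw [crF, if_neg hm]
      omega

theorem rev_block (cs : List Char) (m n : Nat) (h : m + n ≤ cs.length) :
    (cs.drop (cs.length - m - n)).take n = ((cs.reverse.drop m).take n).reverse := by
  rw [List.drop_reverse, List.take_reverse, List.reverse_reverse, List.length_take,
    List.drop_take]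
  have h1 : min (cs.length - m) cs.length - n = cs.length - m - n := by omega
  have h2 : cs.length - m - (cs.length - m - n) = n := by omega
  rw [h1, h2]

theorem slice_block (cs : List Char) (n j : Nat) (hn : 1 ≤ n) (hnL : n ≤ cs.length)
    (hjL : j * n ≤ cs.length) :
    ((PySem.List.slice cs (some (((cs.length : Int) - ↑(j * n)) - ↑n)) (some ((cs.length : Int) - ↑(j * n)))
        = (cs.reverse.take n).reverse)
      ↔ (cs.reverse.drop (j * n)).take n = cs.reverse.take n) := by
  by_cases hcase : j * n + n ≤ cs.length
  · have e1 : (cs.length : Int) - ↑(j * n) - ↑n = ((cs.length - j * n - n : Nat) : Int) := by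
      push_cast; omega
    have e2 : (cs.length : Int) - ↑(j * n) = ((cs.length - j * n : Nat) : Int) := by
      push_cast; omega
    rw [e1, e2, PySem.List.slice_natCast]
    have e3 : cs.length - j * n - (cs.length - j * n - n) = n := by omega
    rw [e3, rev_block cs (j * n) n hcase]
    constructor
    · intro h; exact List.reverse_injective h
    · intro h; rw [h]
  · have hk : 0 < j * n + n - cs.length := by omega
    have e1 : (cs.length : Int) - ↑(j * n) - ↑n = -((j * n + n - cs.length : Nat) : Int) := by
      push_cast; omega
    have hlen : (PySem.List.slice cs (some (((cs.length : Int) - ↑(j * n)) - ↑n))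
        (some ((cs.length : Int) - ↑(j * n)))).length = 0 := by
      rw [e1]
      have e2 : (cs.length : Int) - ↑(j * n) = ((cs.length - j * n : Nat) : Int) := by
        push_cast; omega
      rw [e2, PySem.List.length_slice, PySem.List.clampIdx_neg_natCast _ _ hk,
        PySem.List.clampIdx_natCast]
      omega
    constructor
    · intro h
      exfalso
      have : ((cs.reverse.take n).reverse).length = n := by simp; omega
      rw [← h, hlen] at this; omega
    · intro h
      exfalso
      have h1 : ((cs.reverse.drop (j * n)).take n).length = cs.length - j * n := by
        simp; omega
      have h2 : (cs.reverse.take n).length = n := by simp; omega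
      rw [h] at h1; omega

theorem countA_eq (cs : List Char) (n : Nat) (hn : 1 ≤ n) (hnL : n ≤ cs.length) :
    ∀ (len j₀ : Nat) (c : Int), 1 ≤ j₀ → (j₀ + len) * n ≤ cs.length + n →
    crCountA cs ((cs.reverse.take n).reverse) (↑n)
        ((List.range' j₀ len).map (fun j => (cs.length : Int) - ↑(j * n))) c
      = c + ↑(crF cs.reverse n j₀ len) := by
  intro len
  induction len with
  | zero => intro j₀ c _ _; simp [crCountA, crF]
  | succ len ih =>
    intro j₀ c hj₀ hbound
    rw [List.range'_succ, List.map_cons]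
    show crCountA _ _ _ (((cs.length : Int) - ↑(j₀ * n)) :: _) c = _
    rw [crCountA]
    have hjL : j₀ * n ≤ cs.length := by nlinarith
    rw [if_congr (slice_block cs n j₀ hn hnL hjL) rfl rfl]
    by_cases hm : (cs.reverse.drop (j₀ * n)).take n = cs.reverse.take n
    · rw [if_pos hm]
      have hb2 : (j₀ + 1 + len) * n ≤ cs.length + n := by
        have e : j₀ + 1 + len = j₀ + (len + 1) := by omega
        rw [e]; exact hbound
      rw [ih (j₀ + 1) (c + 1) (by omega) hb2]
      have hF : crF cs.reverse n j₀ (len + 1) = crF cs.reverse n (j₀ + 1) len + 1 := by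
        rw [crF, if_pos hm]
      rw [hF]; push_cast; ring
    · rw [if_neg hm]
      have hF : crF cs.reverse n j₀ (len + 1) = 0 := by rw [crF, if_neg hm]
      rw [hF]; simp

-- value of the inner scan: 1 + A's extra matches = 1 + lcp/n
theorem crF_val (s : List Char) (n : Nat) (hn : 1 ≤ n) (hnL : n ≤ s.length) :
    crF s n 1 (s.length / n) = crLcp s (s.drop n) / n := by
  generalize hgen : crLcp s (s.drop n) = k
  have hkL : k ≤ s.length - n := by
    rw [← hgen]; simpa using crLcp_le_right s (s.drop n)
  have hdivlt : k / n < s.length / n := by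
    have h1 : k / n ≤ (s.length - n) / n := Nat.div_le_div_right hkL
    have h2 : (s.length - n) / n + 1 = s.length / n := by
      rw [← Nat.add_div_right _ (by omega : 0 < n)]
      congr 1
      omega
    omega
  have hfail : ¬ ((s.drop ((k / n + 1) * n)).take n = s.take n) := by
    intro hmf
    have hall : ∀ i ≤ k / n + 1, (s.drop (i * n)).take n = s.take n := by
      intro i hi
      rcases Nat.lt_or_ge i (k / n + 1) with h | h
      · refine match_of_le s n hn i ?_
        have h1 : i * n ≤ (k / n) * n := Nat.mul_le_mul_right n (Nat.lt_succ_iff.mp h)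
        have h2 : (k / n) * n ≤ k := Nat.div_mul_le_self k n
        exact le_trans (le_trans h1 h2) (le_of_eq hgen.symm)
      · have hieq : i = k / n + 1 := le_antisymm hi h
        rw [hieq]; exact hmf
    have hle := le_of_match s n hn hnL (k / n + 1) hall
    rw [hgen] at hle
    have hd := Nat.div_add_mod k n
    have hm := Nat.mod_lt k (by omega : 0 < n)
    have he : (k / n + 1) * n = n * (k / n) + n := by ring
    rw [he] at hle
    omega
  have := crF_first_fail s n (s.length / n) 1 (k / n + 1)
    (Nat.succ_le_succ (Nat.zero_le _)) (lt_of_lt_of_le (Nat.add_lt_add_right hdivlt 1) (le_of_eq (Nat.add_comm _ 1)))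
    (fun i hi1 hi2 => match_of_le s n hn i
      (le_trans (le_trans (Nat.mul_le_mul_right n (Nat.lt_succ_iff.mp hi2))
        (Nat.div_mul_le_self k n)) (le_of_eq hgen.symm))) hfail
  rw [this]
  exact Nat.add_sub_cancel _ _

theorem pyRange_inner (L n : Nat) (hn : 1 ≤ n) (hnL : n ≤ L) :
    PySem.List.pyRange ((L : Int) - ↑n) (-1) (-(n : Int)) =
      (List.range' 1 (L / n)).map (fun j => (L : Int) - ↑(j * n)) := by
  have hstep : ¬ (-(n : Int) = 0) := by omega
  have hpos : ¬ (0 < -(n : Int)) := by omega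
  have hlt : (-1 : Int) < (L : Int) - ↑n := by omega
  simp only [PySem.List.pyRange, if_neg hstep, if_neg hpos, if_pos hlt]
  have hcount : ((((L : Int) - ↑n) - (-1) + - -(n : Int) - 1) / - -(n : Int)).toNat = L / n := by
    have e1 : (((L : Int) - ↑n) - (-1) + - -(n : Int) - 1) = (L : Int) := by ring
    rw [e1]
    have e2 : - -(n : Int) = ((n : Nat) : Int) := by ring
    rw [e2]
    rw [← Int.natCast_ediv, Int.toNat_natCast]
  rw [hcount, List.range'_eq_map_range, List.map_map]
  apply List.map_congr_left
  intro k _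
  show ((L : Int) - ↑n) + -(n : Int) * ↑k = (L : Int) - ↑((1 + k) * n)
  push_cast; ring

theorem pyRange_outer (L : Nat) :
    PySem.List.pyRange 1 (PySem.Int.floordiv (L : Int) 6) 1 =
      (List.range' 1 (L / 6 - 1)).map (fun n : Nat => (n : Int)) := by
  have h6 : PySem.Int.floordiv (L : Int) 6 = ((L / 6 : Nat) : Int) := by
    exact_mod_cast PySem.Int.floordiv_natCast L 6
  rw [h6, PySem.List.pyRange_one]
  have hc : (((L / 6 : Nat) : Int) - 1).toNat = L / 6 - 1 := by omega
  rw [hc, List.range'_eq_map_range, List.map_map]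
  apply List.map_congr_left
  intro k _
  show (1 : Int) + ↑k = ((1 + k : Nat) : Int)
  push_cast; ring

theorem main_loop (cs : List Char) :
    ∀ ns : List Nat, (∀ n ∈ ns, 1 ≤ n ∧ n ≤ cs.length) →
    crMainA cs (cs.length : Int) (ns.map (fun n : Nat => (n : Int))) = crMainB cs.reverse ns := by
  intro ns
  induction ns with
  | nil => intro _; rfl
  | cons n rest ih =>
    intro hmem
    obtain ⟨hn, hnL⟩ := hmem n (List.mem_cons_self)
    have hrevlen : cs.reverse.length = cs.length := List.length_reverse
    rw [List.map_cons]
    show (let ngram := PySem.List.slice cs (some (-(n : Int))) none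
          let count := crCountA cs ngram (↑n)
            (PySem.List.pyRange ((cs.length : Int) - ↑n) (-1) (-(n : Int))) 1
          if count > 5 then (true, String.ofList ngram, count)
          else crMainA cs (cs.length : Int) (rest.map (fun n : Nat => (n : Int)))) =
         (let k := crLcp cs.reverse (cs.reverse.drop n)
          let count := 1 + k / n
          if count > 5 then (true, String.ofList ((cs.reverse.take n).reverse), (count : Int))
          else crMainB cs.reverse rest)
    have hng : PySem.List.slice cs (some (-(n : Int))) none = (cs.reverse.take n).reverse := by
      rw [PySem.List.slice_from_neg_natCast cs n hn, List.take_reverse, List.reverse_reverse]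
    simp only [hng]
    have hbound : (1 + cs.length / n) * n ≤ cs.length + n := by
      have h2 : (cs.length / n) * n ≤ cs.length := Nat.div_mul_le_self _ _
      have h3 : (1 + cs.length / n) * n = n + (cs.length / n) * n := by ring
      omega
    rw [pyRange_inner cs.length n hn hnL,
      countA_eq cs n hn hnL (cs.length / n) 1 1 (le_refl 1) hbound]
    have hF : crF cs.reverse n 1 (cs.length / n) = crLcp cs.reverse (cs.reverse.drop n) / n := by
      have := crF_val cs.reverse n hn (by rw [hrevlen]; exact hnL)
      rwa [hrevlen] at this
    rw [hF]
    by_cases hc : 5 < 1 + crLcp cs.reverse (cs.reverse.drop n) / n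
    · rw [if_pos (by exact_mod_cast (by omega : (5 : Int) < 1 + ↑(crLcp cs.reverse (cs.reverse.drop n) / n))), if_pos hc]
      refine congrArg _ (congrArg _ ?_)
      push_cast; ring
    · rw [if_neg (by
        intro hcon
        apply hc
        have : (5 : Int) < 1 + ↑(crLcp cs.reverse (cs.reverse.drop n) / n) := hcon
        exact_mod_cast (by omega : ((5 : Nat) : Int) < ((1 + crLcp cs.reverse (cs.reverse.drop n) / n : Nat) : Int))), if_neg hc]
      exact ih (fun m hm => hmem m (List.mem_cons_of_mem _ hm))

theorem check_repeated_ending_spec : Claim_equal_check_repeated_ending := by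
  intro text _
  unfold Spec_check_repeated_ending check_repeated_ending check_repeated_ending_alt
  show crMainA text.toList (text.toList.length : Int)
      (PySem.List.pyRange 1 (PySem.Int.floordiv (text.toList.length : Int) 6) 1) =
    crMainB text.toList.reverse (List.range' 1 (text.toList.reverse.length / 6 - 1))
  rw [List.length_reverse, pyRange_outer]
  exact main_loop text.toList _ (by
    intro n hn
    have := List.mem_range'_1.mp hn
    have hle : text.toList.length / 6 ≤ text.toList.length := Nat.div_le_self _ _
    constructor <;> omega)
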